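-- pv_equiv track=rewrite | github.com/timotheengineer/Safaricom_Codility_Challenge | max_slice.py | solution
-- ===== SOURCE A (Python) =====
-- def solution(A):
--
--     sum_of_slices_list = [] #initialise sum list
--     no_non_negative_slices_in_array = True #when slices are negative
--     previous_index_of_negative_number = -1 # assuming the first index is negative
--
--     for index , element in enumerate(A):#returns element and the index we start from 0 index
--
--         if element < 0:
--
--             if previous_index_of_negative_number == -1 and index == 0:
--                  # the first element is negative and thus no calculations is possible , just need to skip to next element
--                 previous_index_of_negative_number = 0
--             else:
--                 slice_of_elements_to_calculate_sum = A[ (previous_index_of_negative_number + 1) : index]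
--                 sum_of_slices_list.append(sum(slice_of_elements_to_calculate_sum))
--                 previous_index_of_negative_number = index
--
--         else:
--             no_non_negative_slices_in_array = False #where all elements are positive
--             sum_of_slices_list.append(element)
--
--     if no_non_negative_slices_in_array:
--         return -1
--     else:
--         return max(sum_of_slices_list)
-- ===== SOURCE B (Python) =====
-- def solution(A):
--     # Single fold: keep the running sum of the current non-negative run (reset
--     # at each negative) and the maximum so far, instead of materialising slices
--     # and a list of sums; O(1) extra space.
--     best = None          # running maximum of everything A would have appended
--     run = 0              # sum of the non-negative run since the last negative
--     seen = False         # saw at least one non-negative element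
--     for i, x in enumerate(A):
--         if x < 0:
--             if i > 0:
--                 best = run if best is None else max(best, run)
--             run = 0
--         else:
--             seen = True
--             run += x
--             best = x if best is None else max(best, x)
--     return best if seen else -1
-- ===== Notes on version B (the rewrite author's own statement) =====
-- stated objective: simpler
-- what changed: Replaces A's materialised list of per-run slice sums (built via repeated slicing by stored indices, then max()) with a single fold that keeps the running sum of the current non-negative run and the maximum so far, in O(1) extra space.
import Mathlib
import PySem

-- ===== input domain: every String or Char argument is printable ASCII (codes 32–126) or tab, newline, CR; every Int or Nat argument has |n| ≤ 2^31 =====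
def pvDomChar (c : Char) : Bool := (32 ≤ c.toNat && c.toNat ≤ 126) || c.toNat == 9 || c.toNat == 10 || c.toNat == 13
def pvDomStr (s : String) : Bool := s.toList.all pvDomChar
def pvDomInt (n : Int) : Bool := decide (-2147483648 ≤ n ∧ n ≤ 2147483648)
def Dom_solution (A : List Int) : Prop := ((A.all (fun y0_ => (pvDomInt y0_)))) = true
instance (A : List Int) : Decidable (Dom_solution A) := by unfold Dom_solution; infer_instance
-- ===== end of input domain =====

-- B replaces A's slice-list-then-max with a single fold keeping the running run-sum and the maximum so far (simpler, O(1) extra space).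

-- ===== PORT A =====
-- loop body of A's for-loop over enumerate(A); state = (sum_of_slices_list, no_non_negative_slices_in_array, previous_index_of_negative_number)
def stepA (A : List Int) (st : List Int × Bool × Int) (p : Int × Int) : List Int × Bool × Int :=
  if p.2 < 0 then
    if st.2.2 = -1 ∧ p.1 = 0 then (st.1, st.2.1, 0)
    else (st.1 ++ [(PySem.List.slice A (some (st.2.2 + 1)) (some p.1)).sum], st.2.1, p.1)
  else (st.1 ++ [p.2], false, st.2.2)

def solution (A : List Int) : Int :=
  let r := (PySem.List.enumerate A 0).foldl (stepA A) ([], true, -1)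
  -- max(sum_of_slices_list); the list is provably non-empty when the flag is false, .getD 0 is unreachable
  if r.2.1 then -1 else (PySem.List.max? r.1 (fun y => y)).getD 0

-- ===== PORT B =====
-- loop body of B's for-loop over enumerate(A); state = (best, run, seen)
def stepB (st : Option Int × Int × Bool) (p : Int × Int) : Option Int × Int × Bool :=
  if p.2 < 0 then
    ((if 0 < p.1 then some (match st.1 with | none => st.2.1 | some m => max m st.2.1) else st.1), 0, st.2.2)
  else
    (some (match st.1 with | none => p.2 | some m => max m p.2), st.2.1 + p.2, true)

def solution_alt (A : List Int) : Int :=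
  let r := (PySem.List.enumerate A 0).foldl stepB (none, 0, false)
  if r.2.2 then r.1.getD 0 else -1

-- ===== PRECONDITION & SPEC =====
def Spec_solution (A : List Int) (out : Int) : Prop := out = solution_alt A
instance (A : List Int) (out : Int) : Decidable (Spec_solution A out) := by unfold Spec_solution; infer_instance

-- ===== CLAIM (what is proved, stated in full; the proofs are below) =====
def Claim_equal_solution : Prop := ∀ (A : List Int), Dom_solution A → Spec_solution A (solution A)

-- ===== LEMMAS AND PROOFS =====

-- Python max over a list grown by one element, as an Option fold step.
lemma max?_append_singleton (lst : List Int) (y : Int) :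
    PySem.List.max? (lst ++ [y]) (fun z => z)
      = some (match PySem.List.max? lst (fun z => z) with | none => y | some m => max m y) := by
  cases lst with
  | nil => rfl
  | cons z zs =>
    simp [PySem.List.max?_id_cons, List.foldl_append]

-- Loop invariant: the two folds stay related (flag = !seen, best = max of A's list),
-- given that run is the sum of A[prev+1:i].
lemma loop_inv (A : List Int) :
    ∀ (l : List Int) (i : Nat) (lst : List Int) (flag : Bool) (prev : Int)
      (best : Option Int) (run : Int) (seen : Bool),
      A.drop i = l →
      flag = !seen →
      best = PySem.List.max? lst (fun y => y) →
      -1 ≤ prev → prev + 1 ≤ (i : Int) →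
      (PySem.List.slice A (some (prev + 1)) (some (i : Int))).sum = run →
      ((PySem.List.enumerate l (i : Int)).foldl (stepA A) (lst, flag, prev)).2.1
        = !(((PySem.List.enumerate l (i : Int)).foldl stepB (best, run, seen)).2.2)
      ∧ ((PySem.List.enumerate l (i : Int)).foldl stepB (best, run, seen)).1
        = PySem.List.max? (((PySem.List.enumerate l (i : Int)).foldl (stepA A) (lst, flag, prev)).1) (fun y => y) := by
  intro l
  induction l with
  | nil =>
    intro i lst flag prev best run seen _ hflag hbest _ _ _
    simp [PySem.List.enumerate_nil, hflag, hbest]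
  | cons x t ih =>
    intro i lst flag prev best run seen hdrop hflag hbest hprev hprevi hrun
    have hi_lt : i < A.length := by
      by_contra h
      have : A.drop i = [] := List.drop_eq_nil_of_le (by omega)
      rw [this] at hdrop; exact (List.cons_ne_nil x t) hdrop.symm
    have hxi : A[i]? = some x := by
      have h0 : (A.drop i)[0]? = some x := by rw [hdrop]; rfl
      simpa using h0
    have hdrop' : A.drop (i + 1) = t := by
      have h1 : List.drop 1 (A.drop i) = t := by rw [hdrop]; rfl
      simpa [List.drop_drop] using h1
    rw [PySem.List.enumerate_cons]
    simp only [List.foldl_cons]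
    by_cases hx : x < 0
    · -- negative element
      by_cases hi0 : i = 0
      · -- first element negative: A skips, B skips (0 < 0 false)
        have hprev0 : prev = -1 := by omega
        have hiZ : ((i : Nat) : Int) = 0 := by exact_mod_cast hi0
        have hA : stepA A (lst, flag, prev) ((i : Int), x) = (lst, flag, 0) := by
          unfold stepA; rw [if_pos hx, if_pos ⟨hprev0, hiZ⟩]
        have hB : stepB (best, run, seen) ((i : Int), x) = (best, 0, seen) := by
          unfold stepB; rw [if_pos hx, if_neg (by simp [hiZ])]
        rw [hA, hB]
        have hcast : ((i : Int) + 1) = ((i + 1 : Nat) : Int) := by push_cast; ring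
        rw [hcast]
        exact ih (i + 1) lst flag 0 best 0 seen hdrop' hflag hbest (by omega) (by push_cast; omega)
          (by subst hi0; rw [PySem.List.slice_toNat _ (by norm_num) (by norm_num)]; simp)
      · -- negative at i > 0: A appends the slice sum (= run), B folds run into best
        have hiZ : (0 : Int) < (i : Int) := by exact_mod_cast Nat.pos_of_ne_zero hi0
        have hA : stepA A (lst, flag, prev) ((i : Int), x)
            = (lst ++ [(PySem.List.slice A (some (prev + 1)) (some (i : Int))).sum], flag, (i : Int)) := by
          have : ¬ (prev = -1 ∧ (i : Int) = 0) := by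
            rintro ⟨_, h0⟩; omega
          unfold stepA; rw [if_pos hx, if_neg this]
        rw [hA, hrun]
        simp only [stepB]
        rw [if_pos hx, if_pos hiZ]
        have hcast : ((i : Int) + 1) = ((i + 1 : Nat) : Int) := by push_cast; ring
        rw [hcast]
        refine ih (i + 1) (lst ++ [run]) flag (i : Int) _ 0 seen hdrop' hflag ?_ (by omega)
          (by push_cast; omega) ?_
        · rw [max?_append_singleton, ← hbest]
        · rw [PySem.List.slice_toNat _ (by positivity) (by positivity)]; simp
      -- (end negative case)
    · -- non-negative element: A appends x, B folds x into best, adds to run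
      have hA : stepA A (lst, flag, prev) ((i : Int), x) = (lst ++ [x], false, prev) := by
        unfold stepA; rw [if_neg hx]
      rw [hA]
      simp only [stepB]
      rw [if_neg hx]
      have hcast : ((i : Int) + 1) = ((i + 1 : Nat) : Int) := by push_cast; ring
      rw [hcast]
      refine ih (i + 1) (lst ++ [x]) false prev _ (run + x) true hdrop' rfl ?_
        hprev (by push_cast; omega) ?_
      · rw [max?_append_singleton, ← hbest]
      · -- run + x = sum of A[prev+1 : i+1]
        rw [← hcast]
        have h0 : (0 : Int) ≤ prev + 1 := by omega
        have hiN : (0 : Int) ≤ (i : Int) := by positivity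
        have hi1N : (0 : Int) ≤ ((i : Int) + 1) := by positivity
        rw [PySem.List.slice_toNat _ h0 hi1N]
        rw [PySem.List.slice_toNat _ h0 hiN] at hrun
        have hsN : (prev + 1).toNat ≤ i := by omega
        have htoNat : ((i : Int) + 1).toNat = i + 1 := by omega
        have htoNi : ((i : Int)).toNat = i := by omega
        rw [htoNat, htoNi] at *
        set s := (prev + 1).toNat with hs
        have hlen : i - s < (A.drop s).length := by
          simp [List.length_drop]; omega
        have hget : (A.drop s)[i - s]? = some x := by
          rw [List.getElem?_drop]
          have : s + (i - s) = i := by omega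
          rw [this, hxi]
        have htake : (A.drop s).take (i + 1 - s) = (A.drop s).take (i - s) ++ [x] := by
          have : i + 1 - s = (i - s) + 1 := by omega
          rw [this, List.take_add_one, hget]
          simp
        rw [htake]
        simp [← hrun]

-- ===== VERDICT (by name: the statement is the Claim_ definition above) =====
theorem solution_spec : Claim_equal_solution := by
  intro A _
  unfold Spec_solution solution solution_alt
  have h := loop_inv A A 0 [] true (-1) none 0 false (by simp) rfl (by simp [PySem.List.max?])
    (by norm_num) (by norm_num) (by rw [PySem.List.slice_toNat _ (by norm_num) (by norm_num)]; simp)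
  simp only [Nat.cast_zero] at h
  obtain ⟨hflag, hbest⟩ := h
  simp only [hflag, hbest]
  cases hseen : (((PySem.List.enumerate A 0).foldl stepB (none, 0, false)).2.2) <;> simp
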